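-- pv_equiv track=rewrite | github.com/Hishamk2/Research-Robot-2024 | rq3/code_relative.py | cal_stat
-- ===== SOURCE A (Python) =====
-- def cal_stat(codes):
--     stats = {}
--     for year in range(2009, 2025):
--         sm = 0
--         for code in codes:
--             if year not in codes[code]:
--                 continue
--             sm += codes[code][year]
--         stats[year] = sm
--     return stats
-- ===== SOURCE B (Python) =====
-- def cal_stat(codes):
--     stats = {year: 0 for year in range(2009, 2025)}
--     for inner in codes.values():
--         for year, value in inner.items():
--             if year in stats:
--                 stats[year] += value
--     return stats
-- ===== Notes on version B (the rewrite author's own statement) =====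
-- stated objective: alternative
-- what changed: B pre-seeds a stats dict with the 16 fixed years and makes one pass over each code's entries, adding guarded by membership, instead of A's 16 outer passes over all codes with a per-code membership test and lookup.
import Mathlib
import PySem

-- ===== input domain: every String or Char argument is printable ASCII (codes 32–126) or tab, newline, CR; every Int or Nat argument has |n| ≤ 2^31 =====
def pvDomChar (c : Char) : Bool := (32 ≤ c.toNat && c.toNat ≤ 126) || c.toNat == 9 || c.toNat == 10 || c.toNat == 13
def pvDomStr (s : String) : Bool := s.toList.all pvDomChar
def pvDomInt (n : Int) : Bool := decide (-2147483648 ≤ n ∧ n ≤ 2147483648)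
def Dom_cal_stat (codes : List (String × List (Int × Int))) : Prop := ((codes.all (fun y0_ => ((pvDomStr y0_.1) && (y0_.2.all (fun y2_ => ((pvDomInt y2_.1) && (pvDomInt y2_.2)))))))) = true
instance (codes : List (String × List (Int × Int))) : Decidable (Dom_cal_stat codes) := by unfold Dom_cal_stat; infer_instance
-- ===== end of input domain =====

-- B replaces A's 16 outer passes over all codes by one pass over each code's entries,
-- added into a dict pre-seeded with the 16 years (alternative decomposition).

-- ===== PORT A =====
-- the Python dict argument as a PySem.Dict (dict-from-pairs semantics), shared by both ports
def calStatDict (codes : List (String × List (Int × Int))) : PySem.Dict String (PySem.Dict Int Int) :=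
  PySem.Dict.ofList (codes.map (fun p => (p.1, PySem.Dict.ofList p.2)))

def cal_stat (codes : List (String × List (Int × Int))) : List (Int × Int) :=
  let d := calStatDict codes
  let stats : PySem.Dict Int Int :=
    (PySem.List.pyRange 2009 2025 1).foldl (fun stats year =>
      let sm : Int :=
        d.keys.foldl (fun sm code =>
          if (d.getD code PySem.Dict.empty).contains year then
            sm + (d.getD code PySem.Dict.empty).getD year 0
          else sm) 0
      stats.insert year sm) PySem.Dict.empty
  stats.items

-- ===== PORT B =====
def cal_stat_alt (codes : List (String × List (Int × Int))) : List (Int × Int) :=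
  let d := calStatDict codes
  let init : PySem.Dict Int Int :=
    (PySem.List.pyRange 2009 2025 1).foldl (fun s y => s.insert y 0) PySem.Dict.empty
  let stats : PySem.Dict Int Int :=
    d.values.foldl (fun stats inner =>
      inner.items.foldl (fun stats p =>
        if stats.contains p.1 then stats.modify p.1 0 (· + p.2) else stats) stats) init
  stats.items

-- ===== PRECONDITION & SPEC =====
def Spec_cal_stat (codes : List (String × List (Int × Int))) (out : List (Int × Int)) : Prop := out = cal_stat_alt codes
instance (codes : List (String × List (Int × Int))) (out : List (Int × Int)) : Decidable (Spec_cal_stat codes out) := by unfold Spec_cal_stat; infer_instance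

-- ===== CLAIM (what is proved, stated in full; the proofs are below) =====
def Claim_equal_cal_stat : Prop := ∀ (codes : List (String × List (Int × Int))), Dom_cal_stat codes → Spec_cal_stat codes (cal_stat codes)

-- ===== LEMMAS AND PROOFS =====

-- A's inner loop as a sum
theorem foldl_ite_add {α : Type} (l : List α) (p : α → Bool) (g : α → Int) (sm : Int) :
    l.foldl (fun sm x => if p x then sm + g x else sm) sm
      = sm + (l.map (fun x => if p x then g x else 0)).sum := by
  induction l generalizing sm with
  | nil => simp
  | cons x l ih =>
      simp only [List.foldl_cons, List.map_cons, List.sum_cons, ih]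
      split_ifs <;> ring

-- B's guarded modify-loop over one code's items: keys never change
theorem bstep_keys (l : List (Int × Int)) (s : PySem.Dict Int Int) :
    (l.foldl (fun s p => if s.contains p.1 then s.modify p.1 0 (· + p.2) else s) s).keys = s.keys := by
  induction l generalizing s with
  | nil => rfl
  | cons p l ih =>
      simp only [List.foldl_cons]
      split_ifs with h
      · rw [ih, PySem.Dict.keys_modify, PySem.Dict.keys_insert_of_contains]
        simpa using h
      · exact ih s

-- …and the value at y grows by the sum of the entries of l keyed y (when y is a key of s)
theorem bstep_getD (l : List (Int × Int)) (s : PySem.Dict Int Int) (y : Int) :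
    (l.foldl (fun s p => if s.contains p.1 then s.modify p.1 0 (· + p.2) else s) s).getD y 0
      = s.getD y 0 + (if s.contains y then ((l.filter (fun p => p.1 == y)).map (·.2)).sum else 0) := by
  induction l generalizing s with
  | nil => simp
  | cons p l ih =>
      simp only [List.foldl_cons, List.filter_cons]
      by_cases hy : p.1 = y
      · subst hy
        by_cases hc : s.contains p.1
        · rw [if_pos hc, ih, PySem.Dict.getD_modify_self]
          have hc' : (s.modify p.1 0 (· + p.2)).contains p.1 = true := by
            simp [PySem.Dict.contains_modify]
          rw [hc', if_pos hc]
          simp; ring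
        · simp [hc, ih]
      · have hne : (p.1 == y) = false := by simp [hy]
        rw [hne]
        by_cases hc : s.contains p.1
        · rw [if_pos hc, ih, PySem.Dict.getD_modify_of_ne s 0 _ (Ne.symm hy),
            PySem.Dict.contains_modify]
          have hyp : y ≠ p.1 := Ne.symm hy
          by_cases hcy : s.contains y <;> simp [hcy, hyp]
        · simp [hc, ih]

-- in a list with distinct keys, filtering by a present key keeps exactly its pair
theorem filter_key_singleton (l : List (Int × Int)) (y : Int) (v : Int)
    (hnd : (l.map (·.1)).Nodup) (hv : (y, v) ∈ l) :
    l.filter (fun p => p.1 == y) = [(y, v)] := by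
  induction l with
  | nil => simp at hv
  | cons q l ih =>
      simp only [List.map_cons, List.nodup_cons] at hnd
      rcases List.mem_cons.1 hv with h | h
      · subst h
        simp only [List.filter_cons, beq_self_eq_true, if_pos]
        have : l.filter (fun p => p.1 == y) = [] := by
          rw [List.filter_eq_nil_iff]
          intro p hp hpy
          exact hnd.1 (by simpa [show p.1 = y from by simpa using hpy] using List.mem_map_of_mem hp (f := (·.1)))
        simp [this]
      · have hqy : (q.1 == y) = false := by
          simp only [beq_eq_false_iff_ne, ne_eq]
          intro hq
          exact hnd.1 (by simpa [hq] using List.mem_map_of_mem h (f := (·.1)))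
        simp only [List.filter_cons, hqy, if_neg Bool.false_ne_true]
        exact ih hnd.2 h

-- for a dict with nodup keys, the entries keyed y sum to getD y 0 (0 if absent)
theorem sum_filter_items (d : PySem.Dict Int Int) (hnd : d.keys.Nodup) (y : Int) :
    ((d.items.filter (fun p => p.1 == y)).map (·.2)).sum
      = if d.contains y then d.getD y 0 else 0 := by
  by_cases hc : d.contains y
  · rw [if_pos hc]
    have hk : y ∈ d.keys := (PySem.Dict.contains_iff_mem_keys d y).1 hc
    obtain ⟨v, hv⟩ : ∃ v, (y, v) ∈ d.items := by
      simp only [PySem.Dict.keys, List.mem_map] at hk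
      obtain ⟨p, hp, hpy⟩ := hk
      exact ⟨p.2, by simpa [← hpy] using hp⟩
    have hget : d.getD y 0 = v := PySem.Dict.getD_of_mem_items d hv hnd 0
    rw [filter_key_singleton d.items y v hnd hv, hget]; simp
  · rw [if_neg hc]
    have : d.items.filter (fun p => p.1 == y) = [] := by
      rw [List.filter_eq_nil_iff]
      intro p hp hpy
      have : p.1 ∈ d.keys := PySem.Dict.mem_keys_of_mem_items d hp
      exact hc ((PySem.Dict.contains_iff_mem_keys d y).2 (by simpa [show p.1 = y from by simpa using hpy] using this))
    simp [this]

-- B's outer loop: keys invariant …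
theorem bfold_keys (L : List (PySem.Dict Int Int)) (s : PySem.Dict Int Int) :
    (L.foldl (fun s inner =>
        inner.items.foldl (fun s p =>
          if s.contains p.1 then s.modify p.1 0 (· + p.2) else s) s) s).keys = s.keys := by
  induction L generalizing s with
  | nil => rfl
  | cons i L ih => simp only [List.foldl_cons]; rw [ih, bstep_keys]

-- … and the value at a present key y accumulates each inner dict's value at y
theorem bfold_getD (L : List (PySem.Dict Int Int)) (s : PySem.Dict Int Int) (y : Int)
    (hL : ∀ i ∈ L, i.keys.Nodup) (hy : s.contains y = true) :
    (L.foldl (fun s inner =>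
        inner.items.foldl (fun s p =>
          if s.contains p.1 then s.modify p.1 0 (· + p.2) else s) s) s).getD y 0
      = s.getD y 0 + (L.map (fun i => if i.contains y then i.getD y 0 else 0)).sum := by
  induction L generalizing s with
  | nil => simp
  | cons i L ih =>
      simp only [List.foldl_cons, List.map_cons, List.sum_cons]
      have hy' : (i.items.foldl (fun s p =>
          if s.contains p.1 then s.modify p.1 0 (· + p.2) else s) s).contains y = true := by
        rw [PySem.Dict.contains_eq_decide_mem_keys, bstep_keys,
          ← PySem.Dict.contains_eq_decide_mem_keys, hy]
      rw [ih _ (fun j hj => hL j (List.mem_cons_of_mem i hj)) hy', bstep_getD, if_pos hy,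
        sum_filter_items i (hL i List.mem_cons_self) y]
      ring

-- every value of the converted codes dict has nodup keys
theorem mem_values_update {κ ν : Type} [BEq κ] [LawfulBEq κ] (ps : List (κ × ν)) (d : PySem.Dict κ ν)
    (w : ν) (hw : w ∈ (d.update ps).values) : w ∈ d.values ∨ ∃ p ∈ ps, w = p.2 := by
  induction ps generalizing d with
  | nil => exact Or.inl hw
  | cons p ps ih =>
      rcases ih (d.insert p.1 p.2) (by simpa [PySem.Dict.update] using hw) with h | h
      · rcases PySem.Dict.mem_values_insert d p.1 p.2 w h with h' | h'
        · exact Or.inr ⟨p, List.mem_cons_self, h'⟩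
        · exact Or.inl h'
      · obtain ⟨q, hq, hwq⟩ := h
        exact Or.inr ⟨q, List.mem_cons_of_mem p hq, hwq⟩

theorem calStatDict_values_nodup (codes : List (String × List (Int × Int)))
    (i : PySem.Dict Int Int) (hi : i ∈ (calStatDict codes).values) : i.keys.Nodup := by
  rcases mem_values_update _ _ _ hi with h | h
  · simp [PySem.Dict.values, PySem.Dict.empty] at h
  · obtain ⟨p, hp, hip⟩ := h
    obtain ⟨q, _, hq⟩ := List.mem_map.1 hp
    rw [hip, ← hq]
    exact PySem.Dict.nodup_keys_ofList q.2

-- ===== VERDICT (by name: the statement is the Claim_ definition above) =====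
theorem cal_stat_spec : Claim_equal_cal_stat := by
  intro codes _
  unfold Spec_cal_stat cal_stat cal_stat_alt
  set d := calStatDict codes with hd
  have hnd : d.keys.Nodup := PySem.Dict.nodup_keys_ofList _
  have hyears : (PySem.List.pyRange 2009 2025 1).Nodup := PySem.List.nodup_pyRange_one 2009 2025
  -- A's result as a map over the years
  have hA : ((PySem.List.pyRange 2009 2025 1).foldl (fun stats year =>
        stats.insert year (d.keys.foldl (fun sm code =>
          if (d.getD code PySem.Dict.empty).contains year then
            sm + (d.getD code PySem.Dict.empty).getD year 0
          else sm) 0)) PySem.Dict.empty).items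
      = (PySem.List.pyRange 2009 2025 1).map (fun y => (y,
          d.keys.foldl (fun sm code =>
            if (d.getD code PySem.Dict.empty).contains y then
              sm + (d.getD code PySem.Dict.empty).getD y 0
            else sm) 0)) := by
    have := PySem.Dict.items_foldl_insert_fresh (PySem.List.pyRange 2009 2025 1)
      (fun y => y)
      (fun y => d.keys.foldl (fun sm code =>
        if (d.getD code PySem.Dict.empty).contains y then
          sm + (d.getD code PySem.Dict.empty).getD y 0
        else sm) 0)
      PySem.Dict.empty (fun a _ => PySem.Dict.contains_empty a) (by simpa using hyears)
    simpa using this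
  -- B's seed dict
  set init : PySem.Dict Int Int :=
    (PySem.List.pyRange 2009 2025 1).foldl (fun s y => s.insert y 0) PySem.Dict.empty with hinit
  have hinitItems : init.items = (PySem.List.pyRange 2009 2025 1).map (fun y => (y, 0)) := by
    have := PySem.Dict.items_foldl_insert_fresh (PySem.List.pyRange 2009 2025 1)
      (fun y => y) (fun _ => (0 : Int))
      PySem.Dict.empty (fun a _ => PySem.Dict.contains_empty a) (by simpa using hyears)
    simpa using this
  have hinitKeys : init.keys = PySem.List.pyRange 2009 2025 1 := by
    rw [PySem.Dict.keys, hinitItems, List.map_map,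
      show ((fun x : Int × Int => x.1) ∘ fun y : Int => (y, 0)) = id from rfl, List.map_id]
  -- B's final dict
  set statsB : PySem.Dict Int Int :=
    d.values.foldl (fun stats inner =>
      inner.items.foldl (fun stats p =>
        if stats.contains p.1 then stats.modify p.1 0 (· + p.2) else stats) stats) init with hstatsB
  have hBkeys : statsB.keys = PySem.List.pyRange 2009 2025 1 := by
    rw [hstatsB, bfold_keys, hinitKeys]
  have hBitems : statsB.items
      = (PySem.List.pyRange 2009 2025 1).map (fun y => (y, statsB.getD y 0)) := by
    rw [PySem.Dict.items_eq_map_keys statsB (by rw [hBkeys]; exact hyears) 0, hBkeys]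
  rw [hA, hBitems]
  apply List.map_congr_left
  intro y hy
  have hiy : init.contains y = true := by
    rw [PySem.Dict.contains_eq_decide_mem_keys, hinitKeys]; simpa using hy
  have hi0 : init.getD y 0 = 0 := by
    apply PySem.Dict.getD_of_mem_items init (k := y) (v := 0)
    · rw [hinitItems]; exact List.mem_map_of_mem hy
    · rw [hinitKeys]; exact hyears
  have hBval : statsB.getD y 0
      = (d.values.map (fun i => if i.contains y then i.getD y 0 else 0)).sum := by
    rw [hstatsB, bfold_getD d.values init y (calStatDict_values_nodup codes) hiy, hi0, zero_add]
  have hvals : d.values = d.keys.map (fun k => d.getD k PySem.Dict.empty) :=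
    PySem.Dict.values_eq_map_keys d hnd PySem.Dict.empty
  rw [hBval, hvals, List.map_map, foldl_ite_add, zero_add]
  rfl
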